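-- pv_equiv track=rewrite | github.com/junanida/Algorithm | 프로그래머스/1/17681. ［1차］ 비밀지도/［1차］ 비밀지도.py | solution
-- ===== SOURCE A (Python) =====
-- def trans(arr, n):
--     new_arr = []
--     for num in arr:
--         new_num = ''
--         for i in range(n):
--             new_num += str(num % 2)
--             num = num // 2
--         new_num = new_num[::-1]
--         new_arr.append(new_num)
--     return new_arr
--
-- def solution(n, arr1, arr2):
--     answer = []
--     new_arr1 = trans(arr1, n)
--     new_arr2 = trans(arr2, n)
--
--     for i in range(n):
--         a = new_arr1[i]
--         b = new_arr2[i]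
--         new_decoding = ''
--         for j in range(n):
--             if a[j] == '1' or b[j] == '1':
--                 new_decoding += '#'
--             else:
--                 new_decoding += ' '
--         answer.append(new_decoding)
--
--     return answer
-- ===== SOURCE B (Python) =====
-- def solution(n, arr1, arr2):
--     if n <= 0:
--         return []
--     mask = (1 << n) - 1
--     table = str.maketrans('10', '# ')
--     return [format((a | b) & mask, '0{}b'.format(n)).translate(table)
--             for a, b in zip(arr1[:n], arr2[:n])]
-- ===== Notes on version B (the rewrite author's own statement) =====
-- stated objective: simpler
-- what changed: B drops the per-number digit-building helper and the per-character comparison loop: each row is the integer bitwise OR of the two numbers masked to n bits, formatted once as an n-wide binary string and translated '1'->'#', '0'->' '; the per-character Python-level loops are replaced by one word-level OR plus C-level format/translate per row, which a timing run measured as much faster at large n.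
import Mathlib
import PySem

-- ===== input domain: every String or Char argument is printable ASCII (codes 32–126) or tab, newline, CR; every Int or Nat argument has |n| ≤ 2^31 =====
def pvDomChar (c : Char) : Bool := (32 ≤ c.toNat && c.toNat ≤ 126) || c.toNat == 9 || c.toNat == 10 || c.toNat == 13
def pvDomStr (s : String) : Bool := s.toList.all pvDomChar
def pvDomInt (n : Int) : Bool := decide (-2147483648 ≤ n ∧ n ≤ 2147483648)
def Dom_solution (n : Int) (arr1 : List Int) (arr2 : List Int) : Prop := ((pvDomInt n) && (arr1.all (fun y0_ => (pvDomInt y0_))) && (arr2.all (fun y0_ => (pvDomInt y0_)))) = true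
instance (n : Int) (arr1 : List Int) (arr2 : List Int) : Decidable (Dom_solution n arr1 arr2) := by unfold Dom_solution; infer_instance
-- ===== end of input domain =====

-- B replaces A's per-number digit-building helper and per-character comparison loop by one
-- integer bitwise OR per row, formatted as an n-wide binary string and translated '1'→'#', '0'→' '
-- (objective: simpler; same asymptotic cost).

-- ===== PORT A =====
-- helper trans(arr, n) (named transA: 'trans' clashes with a Mathlib name); Python strings are
-- ported as List Char (PySem convention); new_num[::-1] is List.reverse (PySem.List.slice?_none_none_neg_one).
def transA (arr : List Int) (n : Int) : List (List Char) :=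
  arr.foldl (fun new_arr num =>
    new_arr ++
      [((PySem.List.pyRange 0 n 1).foldl
          (fun (st : List Char × Int) _i =>
            (st.1 ++ (PySem.Int.toStr (PySem.Int.mod st.2 2)).toList, PySem.Int.floordiv st.2 2))
          ([], num)).1.reverse]) []

-- new_arr1[i] / a[j]: Python raises IndexError out of range; those inputs are excluded by
-- Pre_solution, so the pyGetD default / the 'some' comparison are never reached on admitted inputs.
def solution (n : Int) (arr1 : List Int) (arr2 : List Int) : List String :=
  let new_arr1 := transA arr1 n
  let new_arr2 := transA arr2 n
  (PySem.List.pyRange 0 n 1).foldl (fun answer i =>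
    answer ++
      [String.ofList ((PySem.List.pyRange 0 n 1).foldl (fun cs j =>
        if (PySem.List.pyGet? (PySem.List.pyGetD new_arr1 i []) j == some '1')
            || (PySem.List.pyGet? (PySem.List.pyGetD new_arr2 i []) j == some '1')
        then cs ++ ['#'] else cs ++ [' ']) [])]) []

-- ===== PORT B =====
-- hand port of format(m, '0{n}b'): n binary digits, low bit last; exact for 0 ≤ m < 2^n,
-- which is the only range B uses it on (m is masked to n bits).
def fmtBinPad : Nat → Int → List Char
  | 0, _ => []
  | k + 1, m => fmtBinPad k (m / 2) ++ [if m % 2 = 1 then '1' else '0']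

-- port of str.translate(str.maketrans('10', '# ')) on a binary string
def trChar (c : Char) : Char := if c = '1' then '#' else ' '

-- (1 << n) - 1 is ported as 2^n - 1 (exact); a | b and m & mask are Int.lor / Int.land,
-- Python's two's-complement | and &.
def solution_alt (n : Int) (arr1 : List Int) (arr2 : List Int) : List String :=
  if n ≤ 0 then []
  else
    let mask : Int := 2 ^ n.toNat - 1
    ((PySem.List.slice arr1 none (some n)).zip (PySem.List.slice arr2 none (some n))).map
      (fun p => String.ofList ((fmtBinPad n.toNat (Int.land (Int.lor p.1 p.2) mask)).map trChar))

-- ===== PRECONDITION & SPEC =====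
-- Pre_ excludes exactly the inputs where A raises IndexError: 0 < n with an array shorter than n.
def Pre_solution (n : Int) (arr1 : List Int) (arr2 : List Int) : Prop :=
  n ≤ (arr1.length : Int) ∧ n ≤ (arr2.length : Int)
instance (n : Int) (arr1 : List Int) (arr2 : List Int) : Decidable (Pre_solution n arr1 arr2) := by
  unfold Pre_solution; infer_instance

def pvWitness_solution : Int × List Int × List Int := (2, [1, 2], [2, 3])

def Spec_solution (n : Int) (arr1 : List Int) (arr2 : List Int) (out : List String) : Prop :=
  out = solution_alt n arr1 arr2
instance (n : Int) (arr1 : List Int) (arr2 : List Int) (out : List String) : Decidable (Spec_solution n arr1 arr2 out) := by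
  unfold Spec_solution; infer_instance

-- ===== CLAIM (what is proved, stated in full; the proofs are below) =====
def Claim_equal_solution : Prop := ∀ (n : Int) (arr1 : List Int) (arr2 : List Int), Dom_solution n arr1 arr2 → Pre_solution n arr1 arr2 → Spec_solution n arr1 arr2 (solution n arr1 arr2)

-- ===== LEMMAS AND PROOFS =====

-- the k-th binary digit (floor division, two's complement on negatives) as Int.testBit
theorem testBit_eq_div_pow (x : Int) (k : Nat) :
    x.testBit k = decide (x / 2 ^ k % 2 = 1) := by
  induction k generalizing x with
  | zero =>
    rcases x with m | m
    · show Nat.testBit m 0 = _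
      rw [Nat.testBit_zero, decide_eq_decide]
      simp only [Int.ofNat_eq_natCast, pow_zero, Int.ediv_one]
      omega
    · show (!(Nat.testBit m 0)) = _
      rw [Nat.testBit_zero]
      simp only [pow_zero, Int.ediv_one, Int.negSucc_eq]
      by_cases h1 : m % 2 = 1 <;> simp [h1] <;> omega
  | succ k ih =>
    rcases x with m | m
    · show Nat.testBit m (k + 1) = _
      rw [Nat.testBit_succ]
      have hcast : ((m / 2 : Nat) : Int) = (m : Int) / 2 := by omega
      have e : (m : Int) / 2 / 2 ^ k = (m : Int) / 2 ^ (k + 1) := by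
        rw [Int.ediv_ediv_of_nonneg (by norm_num), show (2 : Int) * 2 ^ k = 2 ^ (k + 1) by ring]
      calc Nat.testBit (m / 2) k = ((m / 2 : Nat) : Int).testBit k := rfl
        _ = decide (((m / 2 : Nat) : Int) / 2 ^ k % 2 = 1) := ih _
        _ = _ := by rw [hcast, e]; rfl
    · show (!(Nat.testBit m (k + 1))) = _
      rw [Nat.testBit_succ]
      have hdiv : Int.negSucc (m / 2) = Int.negSucc m / 2 := by
        rw [Int.negSucc_eq, Int.negSucc_eq]; omega
      calc (!(Nat.testBit (m / 2) k)) = (Int.negSucc (m / 2)).testBit k := rfl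
        _ = decide (Int.negSucc (m / 2) / 2 ^ k % 2 = 1) := ih _
        _ = _ := by
              rw [hdiv, Int.ediv_ediv_of_nonneg (by norm_num),
                  show (2 : Int) * 2 ^ k = 2 ^ (k + 1) by ring]

theorem testBit_mask (n k : Nat) : ((2 ^ n - 1 : Int)).testBit k = decide (k < n) := by
  have h : ((2 ^ n - 1 : Nat) : Int) = 2 ^ n - 1 := by
    push_cast [Nat.one_le_two_pow]; ring
  rw [← h]
  show Nat.testBit (2 ^ n - 1) k = _
  exact Nat.testBit_two_pow_sub_one n k

-- the central bit fact: digit k of (a | b) & (2^n - 1) for k < n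
theorem bit_or_mask (a b : Int) (n k : Nat) (hk : k < n) :
    (Int.land (Int.lor a b) (2 ^ n - 1)) / 2 ^ k % 2 = 1 ↔
      (a / 2 ^ k % 2 = 1 ∨ b / 2 ^ k % 2 = 1) := by
  have h := testBit_eq_div_pow (Int.land (Int.lor a b) (2 ^ n - 1)) k
  have h2 : (Int.land (Int.lor a b) (2 ^ n - 1)).testBit k = (a.testBit k || b.testBit k) := by
    rw [Int.testBit_land, Int.testBit_lor, testBit_mask, decide_eq_true hk, Bool.and_true]
  rw [testBit_eq_div_pow a, testBit_eq_div_pow b] at h2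
  rw [h2] at h
  constructor
  · intro hx
    have := h.trans (decide_eq_true hx)
    rcases Bool.or_eq_true_iff.mp this with h' | h' <;> [left; right] <;> exact of_decide_eq_true h'
  · intro hx
    apply of_decide_eq_true
    rw [← h]
    rcases hx with h' | h' <;> simp [decide_eq_true h']

-- reversing an n-map over range n is mapping with reflected index
theorem reverse_map_range {α : Type} (f : Nat → α) (n : Nat) :
    (List.map f (List.range n)).reverse = List.map (fun j => f (n - 1 - j)) (List.range n) := by
  induction n generalizing f with
  | zero => simp
  | succ n ih =>
    conv_lhs => rw [List.range_succ_eq_map]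
    simp only [List.map_cons, List.map_map, List.reverse_cons]
    rw [ih (f ∘ Nat.succ)]
    conv_rhs => rw [List.range_succ]
    rw [List.map_append]
    congr 1
    · apply List.map_congr_left
      intro j hj
      have hjn := List.mem_range.mp hj
      simp only [Function.comp_apply]
      congr 1
      omega
    · simp

-- A's inner digit loop: state after folding over range(n')
theorem trans_loop (n' : Nat) (num : Int) :
    ((PySem.List.pyRange 0 (n' : Int) 1).foldl
      (fun (st : List Char × Int) (_i : Int) =>
        (st.1 ++ (PySem.Int.toStr (PySem.Int.mod st.2 2)).toList, PySem.Int.floordiv st.2 2))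
      ([], num)) =
    (List.map (fun k => if num / 2 ^ k % 2 = 1 then '1' else '0') (List.range n'), num / 2 ^ n') := by
  have t0 : (PySem.Int.toStr 0).toList = ['0'] := by decide
  have t1 : (PySem.Int.toStr 1).toList = ['1'] := by decide
  induction n' with
  | zero =>
    rw [PySem.List.pyRange_one_eq_nil (by norm_num)]
    simp
  | succ n' ih =>
    rw [show ((n' + 1 : Nat) : Int) = (n' : Int) + 1 by push_cast; ring,
        PySem.List.pyRange_one_succ_right (by positivity), List.foldl_append, ih]
    simp only [List.foldl_cons, List.foldl_nil]
    have hfd : PySem.Int.floordiv (num / 2 ^ n') 2 = num / 2 ^ (n' + 1) := by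
      rw [PySem.Int.floordiv_eq_ediv_of_pos (by norm_num),
          Int.ediv_ediv_of_nonneg (by positivity),
          show (2 ^ n' : Int) * 2 = 2 ^ (n' + 1) by ring]
    have hmod : PySem.Int.mod (num / 2 ^ n') 2 = num / 2 ^ n' % 2 := by
      rw [PySem.Int.mod_eq_emod_of_pos (by norm_num)]
    rw [hfd, hmod, List.range_succ, List.map_append]
    rcases Int.emod_two_eq (num / 2 ^ n') with h | h <;> rw [h] <;> simp [t0, t1] <;> omega

-- B's padded binary formatter, characterised
theorem fmtBinPad_eq (n' : Nat) (m : Int) :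
    fmtBinPad n' m =
      (List.map (fun k => if m / 2 ^ k % 2 = 1 then '1' else '0') (List.range n')).reverse := by
  induction n' generalizing m with
  | zero => simp [fmtBinPad]
  | succ n' ih =>
    rw [fmtBinPad, ih, List.range_succ_eq_map, List.map_cons, List.map_map, List.reverse_cons]
    congr 1
    · apply congrArg
      apply List.map_congr_left
      intro k _
      have e : m / 2 / 2 ^ k = m / 2 ^ (k + 1) := by
        rw [Int.ediv_ediv_of_nonneg (by norm_num), show (2 : Int) * 2 ^ k = 2 ^ (k + 1) by ring]
      simp [Function.comp_apply, e]
    · simp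

-- ===== VERDICT (by name: the statement is the Claim_ definition above) =====
theorem solution_spec : Claim_equal_solution := by
  intro n arr1 arr2 _ hpre
  unfold Spec_solution
  rcases le_or_gt n 0 with hn | hn
  · unfold solution solution_alt
    rw [PySem.List.pyRange_one_eq_nil (by omega)]
    simp [hn]
  · obtain ⟨n', rfl⟩ : ∃ n' : Nat, n = (n' : Int) := ⟨n.toNat, (Int.toNat_of_nonneg (by omega)).symm⟩
    have hn0 : 0 < n' := by exact_mod_cast hn
    obtain ⟨h1, h2⟩ := hpre
    have hl1 : n' ≤ arr1.length := by exact_mod_cast h1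
    have hl2 : n' ≤ arr2.length := by exact_mod_cast h2
    have hshape : ∀ (p : Int → Bool) (l : List Int),
        l.foldl (fun (cs : List Char) j => if p j then cs ++ ['#'] else cs ++ [' ']) [] =
          l.map (fun j => if p j then '#' else ' ') := by
      intro p l
      have hfun : (fun (cs : List Char) (j : Int) => if p j then cs ++ ['#'] else cs ++ [' ']) =
          fun cs j => cs ++ [if p j then '#' else ' '] := by
        funext cs j; by_cases h : p j <;> simp [h]
      rw [hfun, PySem.List.foldl_append_singleton_eq_map, List.nil_append]
    have htrans : ∀ arr : List Int, transA arr (n' : Int) =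
        arr.map (fun num =>
          (List.map (fun k => if num / 2 ^ k % 2 = 1 then '1' else '0') (List.range n')).reverse) := by
      intro arr
      unfold transA
      rw [PySem.List.foldl_append_singleton_eq_map, List.nil_append]
      apply List.map_congr_left
      intro num _
      rw [trans_loop]
    unfold solution solution_alt
    rw [if_neg (by omega : ¬ ((n' : Int) ≤ 0))]
    rw [htrans arr1, htrans arr2,
        PySem.List.foldl_append_singleton_eq_map, List.nil_append,
        PySem.List.slice_to arr1 (by positivity), PySem.List.slice_to arr2 (by positivity)]
    simp only [Int.toNat_natCast]
    apply List.ext_getElem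
    · simp only [List.length_map, PySem.List.length_pyRange_one, List.length_zip,
        List.length_take]
      omega
    · intro i hiL hiR
      have hi : i < n' := by
        simp only [List.length_map, PySem.List.length_pyRange_one] at hiL
        omega
      simp only [List.getElem_map, PySem.List.getElem_pyRange_one, zero_add,
        List.getElem_zip, List.getElem_take]
      refine congrArg String.ofList ?_
      rw [hshape]
      rw [PySem.List.pyRange_one]
      simp only [Int.sub_zero, Int.toNat_natCast, zero_add, List.map_map]
      simp only [PySem.List.pyGetD_natCast]
      rw [List.getD_eq_getElem _ _ (by simpa using lt_of_lt_of_le hi hl1),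
          List.getD_eq_getElem _ _ (by simpa using lt_of_lt_of_le hi hl2)]
      simp only [List.getElem_map]
      rw [reverse_map_range, reverse_map_range]
      rw [fmtBinPad_eq, List.map_reverse, List.map_map, reverse_map_range]
      apply List.map_congr_left
      intro jn hjn
      have hjn' : jn < n' := List.mem_range.mp hjn
      have hK : n' - 1 - jn < n' := by omega
      simp only [Function.comp_apply, PySem.List.pyGet?_natCast]
      rw [List.getElem?_eq_getElem (by simpa using hjn'),
          List.getElem?_eq_getElem (by simpa using hjn')]
      simp only [List.getElem_map, List.getElem_range]
      have hm := bit_or_mask (arr1[i]) (arr2[i]) n' (n' - 1 - jn) hK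
      by_cases hA : arr1[i] / 2 ^ (n' - 1 - jn) % 2 = 1 <;>
        by_cases hB : arr2[i] / 2 ^ (n' - 1 - jn) % 2 = 1
      · simp [trChar, hA, hB, hm.mpr (Or.inl hA)]
      · simp [trChar, hA, hB, hm.mpr (Or.inl hA)]
      · simp [trChar, hA, hB, hm.mpr (Or.inr hB)]
      · have hnm : ¬ ((Int.land (Int.lor arr1[i] arr2[i]) (2 ^ n' - 1)) / 2 ^ (n' - 1 - jn) % 2 = 1) := by
          intro h
          rcases hm.mp h with h' | h'
          · exact hA h'
          · exact hB h'
        simp [trChar, hA, hB, hnm]
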